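-- pv_equiv track=rewrite | github.com/juanfran143/Charla | Day1/CodeForces/Dragon.py | can_defeat_all_dragons
-- ===== SOURCE A (Python) =====
-- def can_defeat_all_dragons(s, n, dragons):
--     # Sort the dragons based on their strength
--     dragons.sort()
--
--     # Loop through each dragon
--     for xi, yi in dragons:
--         if s > xi:
--             # Kirito wins and gains bonus strength
--             s += yi
--         else:
--             # Kirito loses
--             return "NO"
--
--     # Kirito defeats all dragons
--     return "YES"
-- ===== SOURCE B (Python) =====
-- def can_defeat_all_dragons(s, n, dragons):
--     # Sort in place (same observable side effect as the original).
--     dragons.sort()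
--     # strengths[i] = Kirito's strength just before fighting dragons[i].
--     strengths = [s]
--     for _, yi in dragons:
--         strengths.append(strengths[-1] + yi)
--     return "YES" if all(st > xi for st, (xi, _) in zip(strengths, dragons)) else "NO"
-- ===== Notes on version B (the rewrite author's own statement) =====
-- stated objective: alternative
-- what changed: Replaces the greedy early-exit loop with a precomputed prefix-strength table followed by a separate all-pass strict comparison against each dragon's strength.
import Mathlib
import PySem

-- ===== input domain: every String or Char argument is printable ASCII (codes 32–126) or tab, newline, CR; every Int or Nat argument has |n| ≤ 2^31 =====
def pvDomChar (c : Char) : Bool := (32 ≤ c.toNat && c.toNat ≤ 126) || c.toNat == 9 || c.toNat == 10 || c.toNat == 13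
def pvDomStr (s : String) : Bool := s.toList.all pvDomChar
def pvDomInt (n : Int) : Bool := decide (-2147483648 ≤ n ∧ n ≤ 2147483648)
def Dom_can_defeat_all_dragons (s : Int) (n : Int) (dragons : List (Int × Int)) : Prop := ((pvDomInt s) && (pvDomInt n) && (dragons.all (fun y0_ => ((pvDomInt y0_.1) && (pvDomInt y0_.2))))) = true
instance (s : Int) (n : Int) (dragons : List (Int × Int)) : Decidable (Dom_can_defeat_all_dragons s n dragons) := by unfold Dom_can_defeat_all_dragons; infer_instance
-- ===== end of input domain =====

-- B replaces A's greedy early-exit loop with a prefix-strength table plus a single all-pass check (alternative decomposition, same cost); B keeps A's in-place sort side effect.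


-- ===== PORT A =====
-- loop of A: for (xi, yi) in dragons: if s > xi: s += yi else return "NO"; then "YES"
def canDefeatLoop (s : Int) (l : List (Int × Int)) : String :=
  match l with
  | [] => "YES"
  | (xi, yi) :: rest => if s > xi then canDefeatLoop (s + yi) rest else "NO"

def can_defeat_all_dragons (s : Int) (n : Int) (dragons : List (Int × Int)) : String :=
  canDefeatLoop s (PySem.List.sorted dragons (fun p => (toLex p : Lex (Int × Int))) false)

-- ===== PORT B =====
-- B: prefix-strength table (strengths[i] = strength before dragon i), then one all-pass check.
def can_defeat_all_dragons_alt (s : Int) (n : Int) (dragons : List (Int × Int)) : String :=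
  let d := PySem.List.sorted dragons (fun p => (toLex p : Lex (Int × Int))) false
  let strengths := List.scanl (fun a p => a + p.2) s d
  if (strengths.zip d).all (fun q => decide (q.2.1 < q.1)) then "YES" else "NO"

-- ===== PRECONDITION & SPEC =====
def Spec_can_defeat_all_dragons (s : Int) (n : Int) (dragons : List (Int × Int)) (out : String) : Prop := out = can_defeat_all_dragons_alt s n dragons
instance (s : Int) (n : Int) (dragons : List (Int × Int)) (out : String) : Decidable (Spec_can_defeat_all_dragons s n dragons out) := by unfold Spec_can_defeat_all_dragons; infer_instance

-- ===== CLAIM (what is proved, stated in full; the proofs are below) =====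
def Claim_equal_can_defeat_all_dragons : Prop := ∀ (s : Int) (n : Int) (dragons : List (Int × Int)), Dom_can_defeat_all_dragons s n dragons → Spec_can_defeat_all_dragons s n dragons (can_defeat_all_dragons s n dragons)

-- ===== LEMMAS AND PROOFS =====
-- Core: on ANY list, the greedy early-exit loop agrees with the prefix-table all-check.
theorem canDefeatLoop_eq_check (l : List (Int × Int)) (s : Int) :
    canDefeatLoop s l =
      (if ((List.scanl (fun a p => a + p.2) s l).zip l).all (fun q => decide (q.2.1 < q.1))
       then "YES" else "NO") := by
  induction l generalizing s with
  | nil => simp [canDefeatLoop]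
  | cons hd tl ih =>
    obtain ⟨x, y⟩ := hd
    simp only [canDefeatLoop, List.scanl_cons, List.zip_cons_cons, List.all_cons]
    by_cases h : x < s
    · rw [if_pos h, ih, decide_eq_true h, Bool.true_and]
    · simp [h]

-- ===== VERDICT (by name: the statement is the Claim_ definition above) =====
theorem can_defeat_all_dragons_spec : Claim_equal_can_defeat_all_dragons := by
  intro s n dragons _
  unfold Spec_can_defeat_all_dragons can_defeat_all_dragons can_defeat_all_dragons_alt
  exact canDefeatLoop_eq_check _ s
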